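-- pv_equiv track=rewrite | github.com/WayScience/NF1_organoid_cell_segmentation | datasets/dataset_00/utils/ImageSelector.py | _has_centered_symmetric_overlap
-- ===== SOURCE A (Python) =====
-- def _has_centered_symmetric_overlap(
--     target_slices: list[int], input_slices: list[int]
-- ) -> bool:
--     """
--     Determines if the target and input slice are symmetric, and
--     if the target slices are centered with the input slices, where
--     number of target slices <= number of input slices.
--
--     We may care about inferencing on slices present in the target image
--     that are not present in the input image because a cell may span
--     multiple slices. Therefore, the model may leverage this this information
--     to potentially improve segmentation performance.
--     """
--
--     def is_symmetric(slices: list[int]) -> bool: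
--         if len(slices) % 2 == 0:
--             return False
--         mid = len(slices) // 2
--         center = slices[mid]
--         left = slices[:mid]
--         right = slices[mid + 1 :]
--         expected_left = [center - i for i in range(1, mid + 1)][::-1]
--         expected_right = [center + i for i in range(1, mid + 1)]
--         return left == expected_left and right == expected_right
--
--     return (
--         is_symmetric(target_slices)
--         and is_symmetric(input_slices)
--         and target_slices[len(target_slices) // 2]
--         == input_slices[len(input_slices) // 2]
--         and len(target_slices) <= len(input_slices)
--     )
-- ===== SOURCE B (Python) =====
-- def _has_centered_symmetric_overlap(
--     target_slices: list[int], input_slices: list[int]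
-- ) -> bool:
--     # Symmetric-and-centered is equivalent to: odd length and consecutive
--     # integers (each adjacent pair differs by exactly 1).
--     def is_symmetric(slices: list[int]) -> bool:
--         return len(slices) % 2 == 1 and all(
--             b - a == 1 for a, b in zip(slices, slices[1:])
--         )
--
--     return (
--         is_symmetric(target_slices)
--         and is_symmetric(input_slices)
--         and target_slices[len(target_slices) // 2]
--         == input_slices[len(input_slices) // 2]
--         and len(target_slices) <= len(input_slices)
--     )
-- ===== Notes on version B (the rewrite author's own statement) =====
-- stated objective: simpler
-- what changed: is_symmetric no longer materializes expected left/right lists and compares slices; it checks odd length plus a single adjacent-difference scan (zip of the list with its tail), since symmetric-and-centered means the list is a consecutive odd-length integer run.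
import Mathlib
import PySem

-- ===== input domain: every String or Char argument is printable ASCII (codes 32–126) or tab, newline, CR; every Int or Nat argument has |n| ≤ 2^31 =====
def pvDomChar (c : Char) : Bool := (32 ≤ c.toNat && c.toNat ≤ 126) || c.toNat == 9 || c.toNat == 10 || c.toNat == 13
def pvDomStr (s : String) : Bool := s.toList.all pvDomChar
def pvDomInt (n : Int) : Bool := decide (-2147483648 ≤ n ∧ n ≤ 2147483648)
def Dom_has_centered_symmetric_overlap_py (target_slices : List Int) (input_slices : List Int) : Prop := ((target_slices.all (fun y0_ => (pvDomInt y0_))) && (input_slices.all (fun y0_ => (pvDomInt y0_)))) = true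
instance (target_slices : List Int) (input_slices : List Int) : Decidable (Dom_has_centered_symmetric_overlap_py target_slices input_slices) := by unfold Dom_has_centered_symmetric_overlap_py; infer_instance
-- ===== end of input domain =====

-- B replaces A's build-expected-lists-and-compare is_symmetric by an odd-length check plus a
-- single adjacent-difference scan (simpler decomposition, same O(n) cost).


-- ===== PORT A =====
-- inner is_symmetric of A; 'len(slices) // 2' on the Nat length is exact (lengths are nonnegative);
-- '[::-1]' is .reverse (exact: PySem.List.slice?_none_none_neg_one)
def pvIsSymA (slices : List Int) : Bool :=
  if slices.length % 2 == 0 then false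
  else
    let mid := slices.length / 2
    match PySem.List.pyGet? slices (mid : Int) with
    | none => false  -- IndexError; unreachable: odd length ⇒ mid < length
    | some center =>
      let left := PySem.List.slice slices none (some (mid : Int))
      let right := PySem.List.slice slices (some ((mid : Int) + 1)) none
      let expected_left := ((PySem.List.pyRange 1 ((mid : Int) + 1) 1).map (fun i => center - i)).reverse
      let expected_right := (PySem.List.pyRange 1 ((mid : Int) + 1) 1).map (fun i => center + i)
      left == expected_left && right == expected_right

-- the center indexings are only evaluated after both is_symmetric checks succeed, so they are in
-- range there (odd length ⇒ len // 2 < len); pyGetD's default is never the result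
def has_centered_symmetric_overlap_py (target_slices : List Int) (input_slices : List Int) : Bool :=
  pvIsSymA target_slices &&
    (pvIsSymA input_slices &&
      ((PySem.List.pyGetD target_slices ((target_slices.length / 2 : Nat) : Int) 0 ==
        PySem.List.pyGetD input_slices ((input_slices.length / 2 : Nat) : Int) 0) &&
       decide (target_slices.length ≤ input_slices.length)))

-- ===== PORT B =====
-- inner is_symmetric of B: odd length and every adjacent pair differs by 1 ('slices[1:]' = drop 1)
def pvIsSymB (slices : List Int) : Bool :=
  (slices.length % 2 == 1) && (slices.zip (slices.drop 1)).all (fun p => p.2 - p.1 == 1)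

def has_centered_symmetric_overlap_py_alt (target_slices : List Int) (input_slices : List Int) : Bool :=
  pvIsSymB target_slices &&
    (pvIsSymB input_slices &&
      ((PySem.List.pyGetD target_slices ((target_slices.length / 2 : Nat) : Int) 0 ==
        PySem.List.pyGetD input_slices ((input_slices.length / 2 : Nat) : Int) 0) &&
       decide (target_slices.length ≤ input_slices.length)))

-- ===== PRECONDITION & SPEC =====
def Spec_has_centered_symmetric_overlap_py (target_slices : List Int) (input_slices : List Int) (out : Bool) : Prop := out = has_centered_symmetric_overlap_py_alt target_slices input_slices
instance (target_slices : List Int) (input_slices : List Int) (out : Bool) : Decidable (Spec_has_centered_symmetric_overlap_py target_slices input_slices out) := by unfold Spec_has_centered_symmetric_overlap_py; infer_instance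

-- ===== CLAIM (what is proved, stated in full; the proofs are below) =====
def Claim_equal_has_centered_symmetric_overlap_py : Prop := ∀ (target_slices : List Int) (input_slices : List Int), Dom_has_centered_symmetric_overlap_py target_slices input_slices → Spec_has_centered_symmetric_overlap_py target_slices input_slices (has_centered_symmetric_overlap_py target_slices input_slices)

-- ===== LEMMAS AND PROOFS =====

/-- the consecutive run a, a+1, …, a+k-1 -/
def pvRun (a : Int) (k : Nat) : List Int := (List.range k).map (fun j : Nat => a + (j : Int))

theorem pvRun_length (a : Int) (k : Nat) : (pvRun a k).length = k := by
  simp [pvRun]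

theorem pvRun_succ (a : Int) (k : Nat) : pvRun a (k + 1) = a :: pvRun (a + 1) k := by
  apply List.ext_getElem
  · simp [pvRun_length]
  · intro j h1 h2
    cases j with
    | zero => simp [pvRun]
    | succ j =>
      simp only [pvRun, List.getElem_map, List.getElem_range, List.getElem_cons_succ]
      omega

theorem pvRun_append (a : Int) (p q : Nat) : pvRun a (p + q) = pvRun a p ++ pvRun (a + p) q := by
  induction p generalizing a with
  | zero => simp [pvRun]
  | succ p ih =>
    have h1 : p + 1 + q = (p + q) + 1 := by omega
    rw [h1, pvRun_succ, ih, pvRun_succ, List.cons_append]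
    have h2 : a + 1 + (p : Int) = a + ((p + 1 : Nat) : Int) := by omega
    rw [h2]

theorem pvRun_getElem (a : Int) (k j : Nat) (h : j < k) :
    (pvRun a k)[j]'(by simpa [pvRun_length] using h) = a + j := by
  simp [pvRun]

/-- B's adjacent-difference scan succeeds exactly on a consecutive run -/
theorem pvChain_iff (a : Int) (t : List Int) :
    (((a :: t).zip t).all (fun p => p.2 - p.1 == 1)) = true ↔ a :: t = pvRun a (t.length + 1) := by
  induction t generalizing a with
  | nil => simp [pvRun]
  | cons b t ih =>
    simp only [List.length_cons]
    constructor
    · intro h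
      simp only [List.zip_cons_cons, List.all_cons, Bool.and_eq_true, beq_iff_eq] at h
      obtain ⟨hb, hrest⟩ := h
      have hb' : b = a + 1 := by omega
      have h2 : b :: t = pvRun b (t.length + 1) := (ih b).mp (by simpa using hrest)
      rw [pvRun_succ, ← hb', ← h2]
    · intro h
      rw [pvRun_succ] at h
      have h2 : b :: t = pvRun (a + 1) (t.length + 1) := (List.cons_eq_cons.mp h).2
      have hb : b = a + 1 := by
        rw [pvRun_succ] at h2
        exact (List.cons_eq_cons.mp h2).1
      have hrest := (ih b).mpr (by rw [← hb] at h2; exact h2)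
      simp only [List.zip_cons_cons, List.all_cons, Bool.and_eq_true, beq_iff_eq]
      exact ⟨by omega, by simpa using hrest⟩

/-- the two is_symmetric implementations agree -/
theorem pvIsSym_eq (s : List Int) : pvIsSymA s = pvIsSymB s := by
  rcases Nat.even_or_odd s.length with he | ho
  · -- even length: both immediately false
    obtain ⟨m, hm⟩ := he
    unfold pvIsSymA pvIsSymB
    simp [hm, show (m + m) % 2 = 0 by omega]
  · obtain ⟨m, hm⟩ := ho
    have hmlt : m < s.length := by omega
    have hmid : s.length / 2 = m := by omega
    rcases s with _ | ⟨x, t⟩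
    · simp at hm
    rw [Bool.eq_iff_iff]
    set s := x :: t with hs
    have hget : PySem.List.pyGet? s ((s.length / 2 : Nat) : Int) = some (s[m]'hmlt) := by
      rw [PySem.List.pyGet?_natCast, hmid]
      exact List.getElem?_eq_getElem hmlt
    set c := s[m]'hmlt with hc
    -- A's expected lists are runs
    have hER : (PySem.List.pyRange 1 (((s.length / 2 : Nat) : Int) + 1) 1).map (fun i => c + i)
        = pvRun (c + 1) m := by
      rw [PySem.List.pyRange_one]
      simp only [hmid, List.map_map, pvRun]
      have h1 : ((m : Int) + 1 - 1).toNat = m := by omega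
      rw [h1]
      apply List.map_congr_left
      intro j _
      simp only [Function.comp_apply]
      omega
    have hEL : ((PySem.List.pyRange 1 (((s.length / 2 : Nat) : Int) + 1) 1).map (fun i => c - i)).reverse
        = pvRun (c - m) m := by
      rw [PySem.List.pyRange_one]
      simp only [hmid]
      have h1 : ((m : Int) + 1 - 1).toNat = m := by omega
      rw [h1]
      apply List.ext_getElem
      · simp [pvRun_length]
      · intro j h₁ h₂
        have hjm : j < m := by simpa [pvRun_length] using h₂
        rw [List.getElem_reverse]
        rw [pvRun_getElem _ _ _ hjm]
        simp only [List.getElem_map, List.getElem_range, List.length_map, List.length_range]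
        omega
    -- A's slices
    have hleft : PySem.List.slice s none (some ((s.length / 2 : Nat) : Int)) = s.take m := by
      rw [PySem.List.slice_to_natCast, hmid]
    have hright : PySem.List.slice s (some (((s.length / 2 : Nat) : Int) + 1)) none = s.drop (m + 1) := by
      have : (((s.length / 2 : Nat) : Int) + 1) = ((m + 1 : Nat) : Int) := by rw [hmid]; omega
      rw [this, PySem.List.slice_from_natCast]
    have hparA : pvIsSymA s = true ↔ (s.take m = pvRun (c - m) m ∧ s.drop (m + 1) = pvRun (c + 1) m) := by
      unfold pvIsSymA
      have hodd : (s.length % 2 == 0) = false := by simp; omega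
      rw [hodd]
      simp only [Bool.false_eq_true, if_false, hget, hleft, hright, hEL, hER,
        Bool.and_eq_true, beq_iff_eq]
    -- s decomposes around its center
    have hdec : s = s.take m ++ c :: s.drop (m + 1) := by
      conv_lhs => rw [← List.take_append_drop m s]
      rw [List.drop_eq_getElem_cons hmlt]
    -- run of full length decomposes the same way
    have hrunfull : pvRun (c - m) s.length = pvRun (c - m) m ++ c :: pvRun (c + 1) m := by
      have h0 : s.length = m + (m + 1) := by omega
      rw [h0, pvRun_append, pvRun_succ]
      have h2 : c - (m : Int) + (m : Int) = c := by omega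
      rw [h2]
    have hodd1 : (s.length % 2 == 1) = true := by simp; omega
    have hparB : pvIsSymB s = true ↔ s = pvRun x (t.length + 1) := by
      unfold pvIsSymB
      rw [hodd1]
      simpa [hs] using pvChain_iff x t
    rw [hparA, hparB]
    constructor
    · rintro ⟨hT, hD⟩
      have hsr : s = pvRun (c - m) s.length := by
        rw [hrunfull, ← hT, ← hD]; exact hdec
      have hx : x = c - m := by
        have hlen : s.length = (2 * m) + 1 := by omega
        rw [hlen, pvRun_succ] at hsr
        exact (List.cons_eq_cons.mp (hs ▸ hsr)).1
      rw [← hx] at hsr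
      have hlen : t.length + 1 = s.length := by rw [hs]; simp
      rw [hlen]; exact hsr
    · intro hB
      have hlen : t.length + 1 = s.length := by rw [hs]; simp
      rw [hlen] at hB
      have hcx : c = x + m := by
        have hge := List.getElem_of_eq hB hmlt
        rw [hc, hge, pvRun_getElem x s.length m (by omega)]
      have hx : x = c - m := by omega
      rw [hx] at hB
      constructor
      · rw [hB]
        have hsp : s.length = m + (m + 1) := by omega
        rw [hsp, pvRun_append]
        rw [List.take_append_of_le_length (by rw [pvRun_length])]
        simp [pvRun]
      · rw [hB]
        have hsp : s.length = (m + 1) + m := by omega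
        rw [hsp, pvRun_append]
        rw [List.drop_append_of_le_length (by rw [pvRun_length])]
        rw [List.drop_eq_nil_of_le (by rw [pvRun_length])]
        rw [List.nil_append]
        congr 1
        omega

-- ===== VERDICT (by name: the statement is the Claim_ definition above) =====
theorem has_centered_symmetric_overlap_py_spec : Claim_equal_has_centered_symmetric_overlap_py := by
  intro t i _
  unfold Spec_has_centered_symmetric_overlap_py has_centered_symmetric_overlap_py has_centered_symmetric_overlap_py_alt
  rw [pvIsSym_eq, pvIsSym_eq]
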